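-- pv_equiv track=rewrite | github.com/Tirsh/Python_exercises | Homework5/task05.py | find_ascending_sequences
-- ===== SOURCE A (Python) =====
-- def list_add(list1, list2):
--     list1.extend(list2)
--     uniq_list = []
--     for item in list1:
--         if item not in uniq_list:
--             uniq_list.append(item)
--     return uniq_list
--
-- def find_ascending_sequences(lst):
--     result = []
--     if len(lst) < 2:
--         return result
--     for j in range(1, len(lst)):
--         new_list = []
--         num = lst[0]
--         new_list.append(num)
--         for i in range(j, len(lst)):
--             if lst[i] > num:
--                 new_list.append(lst[i])
--                 num = lst[i]
--         result.extend([new_list[:i] for i in range(2, len(new_list) + 1) if new_list[:i] not in result])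
--     return list_add(find_ascending_sequences(lst[1::]), result)
-- ===== SOURCE B (Python) =====
-- def find_ascending_sequences(lst):
--     flat = []
--     for start in range(len(lst) - 2, -1, -1):
--         sub = lst[start:]
--         for j in range(1, len(sub)):
--             seq = [sub[0]]
--             last = sub[0]
--             for x in sub[j:]:
--                 if x > last:
--                     seq.append(x)
--                     last = x
--             flat.extend(seq[:i] for i in range(2, len(seq) + 1))
--     uniq = []
--     for item in flat:
--         if item not in uniq:
--             uniq.append(item)
--     return uniq
-- ===== Notes on version B (the rewrite author's own statement) =====
-- stated objective: simpler
-- what changed: Replaced A's recursion on suffixes with per-call eager dedup (membership filter inside the comprehension plus list_add after every recursive call) by a flat descending loop over start indices that collects all prefix slices into one list and deduplicates once at the end, preserving first occurrence.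
import Mathlib
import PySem

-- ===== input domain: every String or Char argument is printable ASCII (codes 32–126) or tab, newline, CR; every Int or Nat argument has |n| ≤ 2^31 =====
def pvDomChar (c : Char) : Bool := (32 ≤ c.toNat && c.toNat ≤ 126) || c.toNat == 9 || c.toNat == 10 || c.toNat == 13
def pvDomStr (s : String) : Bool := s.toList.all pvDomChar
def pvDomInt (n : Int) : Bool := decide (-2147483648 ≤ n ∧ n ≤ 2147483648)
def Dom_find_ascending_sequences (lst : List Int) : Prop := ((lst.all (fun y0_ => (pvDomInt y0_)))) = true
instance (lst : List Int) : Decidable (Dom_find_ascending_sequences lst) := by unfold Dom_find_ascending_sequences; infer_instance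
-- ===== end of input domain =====

-- B replaces A's recursion on suffixes by an explicit descending loop over start indices with a
-- single final first-occurrence dedup pass (objective: simpler — no recursion, one dedup).

-- ===== PORT A =====
def list_add (list1 list2 : List (List Int)) : List (List Int) :=
  ((list1 ++ list2).foldl (fun uniq_list item =>
    if item ∈ uniq_list then uniq_list else uniq_list ++ [item]) [])

def find_ascending_sequences (lst : List Int) : List (List Int) :=
  if lst.length < 2 then []
  else
    let result := (PySem.List.pyRange 1 (lst.length : Int) 1).foldl (fun result j =>
      let st := (PySem.List.pyRange j (lst.length : Int) 1).foldl
        (fun (st : List Int × Int) i =>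
          if PySem.List.pyGetD lst i 0 > st.2 then
            (st.1 ++ [PySem.List.pyGetD lst i 0], PySem.List.pyGetD lst i 0)
          else st)
        ([PySem.List.pyGetD lst 0 0], PySem.List.pyGetD lst 0 0)
      result ++ ((PySem.List.pyRange 2 ((st.1.length : Int) + 1) 1).map
          (fun i => PySem.List.slice st.1 none (some i))).filter
          (fun p => p ∉ result)) []
    list_add (find_ascending_sequences lst.tail) result
termination_by lst.length
decreasing_by simp; omega

-- ===== PORT B =====
def find_ascending_sequences_alt (lst : List Int) : List (List Int) :=
  let flat := (PySem.List.pyRange ((lst.length : Int) - 2) (-1) (-1)).foldl (fun flat start =>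
    let sub := PySem.List.slice lst (some start) none
    (PySem.List.pyRange 1 (sub.length : Int) 1).foldl (fun flat j =>
      let st := (PySem.List.slice sub (some j) none).foldl
        (fun (st : List Int × Int) x => if x > st.2 then (st.1 ++ [x], x) else st)
        ([PySem.List.pyGetD sub 0 0], PySem.List.pyGetD sub 0 0)
      flat ++ (PySem.List.pyRange 2 ((st.1.length : Int) + 1) 1).map
        (fun i => PySem.List.slice st.1 none (some i))) flat) []
  flat.foldl (fun uniq item => if item ∈ uniq then uniq else uniq ++ [item]) []

-- ===== PRECONDITION & SPEC =====
def Spec_find_ascending_sequences (lst : List Int) (out : List (List Int)) : Prop := out = find_ascending_sequences_alt lst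
instance (lst : List Int) (out : List (List Int)) : Decidable (Spec_find_ascending_sequences lst out) := by unfold Spec_find_ascending_sequences; infer_instance

-- ===== CLAIM (what is proved, stated in full; the proofs are below) =====
def Claim_equal_find_ascending_sequences : Prop := ∀ (lst : List Int), Dom_find_ascending_sequences lst → Spec_find_ascending_sequences lst (find_ascending_sequences lst)

-- ===== LEMMAS AND PROOFS =====

-- first-occurrence dedup as a fold
def ddStep (acc : List (List Int)) (x : List Int) : List (List Int) :=
  if x ∈ acc then acc else acc ++ [x]

def dd (acc : List (List Int)) (l : List (List Int)) : List (List Int) :=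
  l.foldl ddStep acc

lemma list_add_eq (l1 l2 : List (List Int)) : list_add l1 l2 = dd [] (l1 ++ l2) := rfl

lemma dd_append (acc u v : List (List Int)) :
    dd acc (u ++ v) = dd (dd acc u) v := List.foldl_append

lemma mem_dd (l acc : List (List Int)) (y : List Int) :
    y ∈ dd acc l ↔ y ∈ acc ∨ y ∈ l := by
  induction l generalizing acc with
  | nil => simp [dd]
  | cons x l ih =>
    show y ∈ dd (ddStep acc x) l ↔ _
    rw [ih]
    unfold ddStep
    split_ifs with h
    · constructor
      · rintro (hy | hy)
        · exact Or.inl hy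
        · exact Or.inr (List.mem_cons_of_mem _ hy)
      · rintro (hy | hy)
        · exact Or.inl hy
        · rcases List.mem_cons.1 hy with he | hy
          · exact Or.inl (he ▸ h)
          · exact Or.inr hy
    · simp; tauto
  
lemma dd_singleton (acc : List (List Int)) (x : List Int) :
    dd acc [x] = ddStep acc x := rfl

lemma dd_ddStep (acc a : List (List Int)) (x : List Int) :
    dd acc (ddStep a x) = ddStep (dd acc a) x := by
  unfold ddStep
  split_ifs with h h2 h2
  · rfl
  · exact absurd ((mem_dd a acc x).2 (Or.inr h)) h2
  · rw [dd_append, dd_singleton]; unfold ddStep; rw [if_pos h2]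
  · rw [dd_append, dd_singleton]; unfold ddStep; rw [if_neg h2]

lemma dd_dd (v a acc : List (List Int)) :
    dd acc (dd a v) = dd (dd acc a) v := by
  induction v generalizing a acc with
  | nil => rfl
  | cons x v ih =>
    show dd acc (dd (ddStep a x) v) = dd (dd acc a) (x :: v)
    rw [ih, dd_ddStep]
    rfl

lemma dd_merge (u v : List (List Int)) :
    dd [] (dd [] u ++ dd [] v) = dd [] (u ++ v) := by
  rw [dd_append, dd_dd, dd_dd]
  show dd (dd [] u) v = _
  rw [dd_append]

lemma filter_dd (xs acc : List (List Int)) (h : xs.Nodup) :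
    acc ++ xs.filter (fun x => x ∉ acc) = dd acc xs := by
  induction xs generalizing acc with
  | nil => simp [dd]
  | cons x xs ih =>
    have hx : x ∉ xs := (List.nodup_cons.1 h).1
    have hnd : xs.Nodup := (List.nodup_cons.1 h).2
    show acc ++ List.filter _ (x :: xs) = dd (ddStep acc x) xs
    unfold ddStep
    split_ifs with hmem
    · rw [← ih acc hnd]
      congr 1
      simp [hmem]
    · rw [← ih (acc ++ [x]) hnd]
      simp only [List.filter_cons]
      have hcg : ∀ y ∈ xs, (decide (y ∉ acc)) = (decide (y ∉ acc ++ [x])) := by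
        intro y hy
        have : y ≠ x := fun e => hx (e ▸ hy)
        simp [this]
      rw [List.filter_congr hcg]
      simp [hmem]

lemma foldl_dd {β : Type} (g : β → List (List Int)) (js : List β) (acc : List (List Int)) :
    js.foldl (fun r j => dd r (g j)) acc = dd acc (js.flatMap g) := by
  induction js generalizing acc with
  | nil => rfl
  | cons j js ih => simp only [List.foldl_cons, List.flatMap_cons, dd_append, ih]

-- canonical pieces of both programs
def greedy (sub : List Int) (j : Int) : List Int × Int :=
  (PySem.List.slice sub (some j) none).foldl
    (fun (st : List Int × Int) x => if x > st.2 then (st.1 ++ [x], x) else st)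
    ([PySem.List.pyGetD sub 0 0], PySem.List.pyGetD sub 0 0)

def prefs (nl : List Int) : List (List Int) :=
  (PySem.List.pyRange 2 ((nl.length : Int) + 1) 1).map (fun i => PySem.List.slice nl none (some i))

def level (sub : List Int) : List (List Int) :=
  (PySem.List.pyRange 1 (sub.length : Int) 1).flatMap (fun j => prefs (greedy sub j).1)

def flatAll (lst : List Int) : List (List Int) :=
  if lst.length < 2 then [] else flatAll lst.tail ++ level lst
termination_by lst.length
decreasing_by simp; omega

lemma nodup_prefs (nl : List Int) : (prefs nl).Nodup := by
  unfold prefs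
  apply List.Nodup.map_on _ (PySem.List.nodup_pyRange_one _ _)
  intro i hi i' hi' he
  rw [PySem.List.mem_pyRange_one] at hi hi'
  have h1 : 0 ≤ i := by omega
  have h1' : 0 ≤ i' := by omega
  rw [PySem.List.slice_to nl h1, PySem.List.slice_to nl h1'] at he
  have := congrArg List.length he
  simp only [List.length_take] at this
  omega

lemma inner_eq (lst : List Int) (j : Int) (hj : 0 ≤ j) :
    (PySem.List.pyRange j (lst.length : Int) 1).foldl
      (fun (st : List Int × Int) i =>
        if PySem.List.pyGetD lst i 0 > st.2 then
          (st.1 ++ [PySem.List.pyGetD lst i 0], PySem.List.pyGetD lst i 0)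
        else st)
      ([PySem.List.pyGetD lst 0 0], PySem.List.pyGetD lst 0 0) = greedy lst j := by
  unfold greedy
  rw [PySem.List.slice_from lst hj]
  exact PySem.List.foldl_pyRange_pyGetD' lst 0
    (fun st x => if x > st.2 then (st.1 ++ [x], x) else st) _ hj

lemma A_eq (lst : List Int) : find_ascending_sequences lst = dd [] (flatAll lst) := by
  induction lst with
  | nil => rw [find_ascending_sequences, flatAll]; rfl
  | cons x rest ih =>
    rw [find_ascending_sequences, flatAll]
    by_cases h : (x :: rest).length < 2
    · simp only [if_pos h]; rfl
    · simp only [if_neg h]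
      have hres : (PySem.List.pyRange 1 (((x :: rest).length : Nat) : Int) 1).foldl (fun result j =>
          let st := (PySem.List.pyRange j (((x :: rest).length : Nat) : Int) 1).foldl
            (fun (st : List Int × Int) i =>
              if PySem.List.pyGetD (x :: rest) i 0 > st.2 then
                (st.1 ++ [PySem.List.pyGetD (x :: rest) i 0], PySem.List.pyGetD (x :: rest) i 0)
              else st)
            ([PySem.List.pyGetD (x :: rest) 0 0], PySem.List.pyGetD (x :: rest) 0 0)
          result ++ ((PySem.List.pyRange 2 ((st.1.length : Int) + 1) 1).map
              (fun i => PySem.List.slice st.1 none (some i))).filter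
              (fun p => p ∉ result)) [] = dd [] (level (x :: rest)) := by
        rw [PySem.List.foldl_congr_mem
          (g := fun r j => dd r (prefs (greedy (x :: rest) j).1))]
        · exact foldl_dd _ _ _
        · intro r j hj
          rw [PySem.List.mem_pyRange_one] at hj
          show r ++ _ = _
          rw [inner_eq (x :: rest) j (by omega)]
          have hf := filter_dd (prefs (greedy (x :: rest) j).1) r (nodup_prefs _)
          unfold prefs at hf
          exact hf
      show list_add (find_ascending_sequences (x :: rest).tail) _ = _
      rw [hres]
      simp only [List.tail_cons]
      rw [list_add_eq, ih]
      exact dd_merge _ _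

-- B's flat list: levels of suffixes, deepest suffix first
def T (lst : List Int) : List (List Int) :=
  ((List.range (lst.length - 1)).reverse).flatMap (fun s => level (lst.drop s))

lemma T_eq_flatAll (lst : List Int) : T lst = flatAll lst := by
  induction lst with
  | nil => rw [flatAll]; rfl
  | cons x rest ih =>
    rw [flatAll]
    by_cases h : (x :: rest).length < 2
    · simp only [if_pos h]
      unfold T
      have : (x :: rest).length - 1 = 0 := by simp only [List.length_cons] at h ⊢; omega
      rw [this]; rfl
    · simp only [if_neg h]
      have hr : 1 ≤ rest.length := by simp only [List.length_cons] at h; omega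
      unfold T
      have hlen : (x :: rest).length - 1 = (rest.length - 1) + 1 := by
        simp only [List.length_cons]; omega
      rw [hlen]
      simp only [List.tail_cons, List.range_succ_eq_map, List.reverse_cons,
        List.flatMap_append, List.flatMap_cons, List.flatMap_nil, List.append_nil,
        List.drop_zero]
      congr 1
      rw [← ih]
      unfold T
      simp [← List.map_reverse, List.flatMap_map, Nat.succ_eq_add_one, List.drop_succ_cons]

lemma range_desc (m : Nat) :
    PySem.List.pyRange ((m : Int) - 1) (-1) (-1) = ((List.range m).reverse).map (Nat.cast : Nat → Int) := by
  induction m with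
  | zero => rw [PySem.List.pyRange_neg_one_eq_nil (by omega)]; rfl
  | succ m ih =>
    have h1 : ((m + 1 : Nat) : Int) - 1 = (m : Int) := by push_cast; ring
    rw [h1, PySem.List.pyRange_neg_one_cons (by omega), List.range_succ,
      List.reverse_append]
    simp only [List.reverse_cons, List.reverse_nil, List.nil_append, List.map_cons,
      List.cons_append]
    rw [ih]

lemma B_flat (lst : List Int) :
    (PySem.List.pyRange ((lst.length : Int) - 2) (-1) (-1)).foldl (fun flat start =>
      (PySem.List.pyRange 1 ((PySem.List.slice lst (some start) none).length : Int) 1).foldl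
        (fun flat j => flat ++ prefs (greedy (PySem.List.slice lst (some start) none) j).1) flat) []
      = T lst := by
  have h1 : ∀ (flat : List (List Int)) (start : Int),
      (PySem.List.pyRange 1 ((PySem.List.slice lst (some start) none).length : Int) 1).foldl
        (fun flat j => flat ++ prefs (greedy (PySem.List.slice lst (some start) none) j).1) flat
      = flat ++ level (PySem.List.slice lst (some start) none) := by
    intro flat start
    rw [PySem.List.foldl_append_eq_flatMap]
    rfl
  simp only [h1]
  rw [PySem.List.foldl_append_eq_flatMap, List.nil_append]
  rcases Nat.eq_zero_or_pos lst.length with h0 | hpos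
  · rw [h0]
    rw [PySem.List.pyRange_neg_one_eq_nil (by omega)]
    unfold T
    rw [h0]
    rfl
  · have : (lst.length : Int) - 2 = ((lst.length - 1 : Nat) : Int) - 1 := by
      push_cast [hpos]; omega
    rw [this, range_desc, List.flatMap_map]
    unfold T
    simp [PySem.List.slice_from_natCast]

lemma B_eq (lst : List Int) : find_ascending_sequences_alt lst = dd [] (T lst) := by
  rw [← B_flat]
  rfl

-- ===== VERDICT (by name: the statement is the Claim_ definition above) =====
theorem find_ascending_sequences_spec : Claim_equal_find_ascending_sequences := by
  intro lst _
  show find_ascending_sequences lst = find_ascending_sequences_alt lst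
  rw [A_eq, B_eq, T_eq_flatAll]
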